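-- pv_equiv track=rewrite | github.com/Fenny-Huy/PathSearch | search.py | dfs
-- ===== SOURCE A (Python) =====
-- def dfs(edges, origin, destinations):
--     stack = [(origin, [origin], 0)]  # (current_node, path, total_cost)
--     visited = set()
--
--     while stack:
--         node, path, cost = stack.pop()
--
--         if node in destinations:
--             return path, cost
--
--         if node not in visited:
--             visited.add(node)
--             for neighbor, edge_cost in edges.get(node, []):
--                 if neighbor not in visited:
--                     stack.append((neighbor, path + [neighbor], cost + edge_cost))
--
--     return None, None
-- ===== SOURCE B (Python) =====
-- def dfs(edges, origin, destinations):
--     visited = set()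
--
--     def visit(node, path, cost):
--         if node in destinations:
--             return path, cost
--         visited.add(node)
--         for neighbor, edge_cost in reversed(edges.get(node, [])):
--             if neighbor not in visited:
--                 result = visit(neighbor, path + [neighbor], cost + edge_cost)
--                 if result is not None:
--                     return result
--         return None
--
--     found = visit(origin, [origin], 0)
--     return found if found is not None else (None, None)
-- ===== Notes on version B (the rewrite author's own statement) =====
-- stated objective: alternative
-- what changed: Replaces A's explicit stack of (node, path-copy, cost) triples and pop-loop by a recursive depth-first visit with a shared visited set, iterating each adjacency list in reverse so the traversal (and hence the returned path, cost and tie-breaking) is identical.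
import Mathlib
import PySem

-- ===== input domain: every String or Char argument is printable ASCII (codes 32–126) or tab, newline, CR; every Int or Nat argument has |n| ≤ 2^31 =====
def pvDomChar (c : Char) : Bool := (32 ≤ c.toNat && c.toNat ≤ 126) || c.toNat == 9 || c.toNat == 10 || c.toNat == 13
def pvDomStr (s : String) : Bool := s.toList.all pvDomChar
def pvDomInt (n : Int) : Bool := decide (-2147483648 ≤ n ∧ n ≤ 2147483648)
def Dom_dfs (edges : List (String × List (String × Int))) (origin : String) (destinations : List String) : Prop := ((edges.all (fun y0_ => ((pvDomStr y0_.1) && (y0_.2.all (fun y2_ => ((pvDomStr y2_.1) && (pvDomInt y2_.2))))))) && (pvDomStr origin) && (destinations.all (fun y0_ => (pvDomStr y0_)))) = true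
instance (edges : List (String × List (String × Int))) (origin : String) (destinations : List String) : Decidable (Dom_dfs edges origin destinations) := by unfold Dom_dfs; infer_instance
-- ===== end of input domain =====

-- B replaces A's explicit stack of (node, path-copy, cost) triples by a recursive depth-first
-- visit over reversed adjacency lists with a shared visited set (objective: alternative
-- decomposition, same observable results; fuel in the Lean ports is the usual totality device,
-- proved sufficient below).

-- ===== PORT A =====

-- `edges.get(node, [])` (both Pythons): first-match association-list lookup
def pvAdj (edges : List (String × List (String × Int))) (node : String) : List (String × Int) :=
  PySem.Dict.getD (PySem.Dict.mk edges) node []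

-- the while-stack loop of A; `none` = fuel exhausted (never happens at pvFuel, proved below)
def dfsLoopA (edges : List (String × List (String × Int))) (dests : List String) :
    Nat → List (String × List String × Int) → PySem.Set String →
    Option (Option (List String) × Option Int)
  | 0, _, _ => none
  | _ + 1, [], _ => some (none, none)
  | fuel + 1, (node, path, cost) :: rest, visited =>
    if dests.contains node then some (some path, some cost)
    else if PySem.Set.contains visited node then
      dfsLoopA edges dests fuel rest visited
    else
      let visited' := PySem.Set.add visited node
      dfsLoopA edges dests fuel
        ((pvAdj edges node).foldl
          (fun st q =>
            if PySem.Set.contains visited' q.1 then st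
            else (q.1, path ++ [q.1], cost + q.2) :: st)
          rest)
        visited'

-- every node that can ever appear on the stack / in visited
def pvAllNodes (edges : List (String × List (String × Int))) (origin : String) :
    PySem.Set String :=
  PySem.Set.ofList (origin :: edges.flatMap (fun p => p.1 :: p.2.map Prod.fst))

def pvTotalAdj (edges : List (String × List (String × Int))) : Nat :=
  (edges.map (fun p => p.2.length)).sum

-- enough fuel for the whole search (proved in dfsLoopA_total below)
def pvFuel (edges : List (String × List (String × Int))) (origin : String) : Nat :=
  2 + (pvAllNodes edges origin).length * (1 + pvTotalAdj edges)

def dfs (edges : List (String × List (String × Int))) (origin : String)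
    (destinations : List String) : Option (List String) × Option Int :=
  match dfsLoopA edges destinations (pvFuel edges origin)
      [(origin, [origin], 0)] PySem.Set.empty with
  | some r => r
  | none => (none, none)

-- ===== PORT B =====

mutual
-- `visit(node, path, cost)` of B; result: none = fuel exhausted,
-- some (some (p, c), v) = found with visited state v, some (none, v) = dead end
def dfsVisitB (edges : List (String × List (String × Int))) (dests : List String)
    (fuel : Nat) (node : String) (path : List String) (cost : Int)
    (visited : PySem.Set String) :
    Option (Option (List String × Int) × PySem.Set String) :=
  match fuel with
  | 0 => none
  | f + 1 =>
    if dests.contains node then some (some (path, cost), visited)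
    else dfsIterB edges dests f ((pvAdj edges node).reverse) path cost
        (PySem.Set.add visited node)
termination_by (fuel, 0)

-- the `for neighbor, edge_cost in reversed(...)` loop of B's visit
def dfsIterB (edges : List (String × List (String × Int))) (dests : List String)
    (fuel : Nat) (ns : List (String × Int)) (path : List String) (cost : Int)
    (visited : PySem.Set String) :
    Option (Option (List String × Int) × PySem.Set String) :=
  match ns with
  | [] => some (none, visited)
  | (n, c) :: ns' =>
    if PySem.Set.contains visited n then dfsIterB edges dests fuel ns' path cost visited
    else
      match dfsVisitB edges dests fuel n (path ++ [n]) (cost + c) visited with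
      | none => none
      | some (some r, v') => some (some r, v')
      | some (none, v') => dfsIterB edges dests fuel ns' path cost v'
termination_by (fuel, ns.length + 1)
end

def dfs_alt (edges : List (String × List (String × Int))) (origin : String)
    (destinations : List String) : Option (List String) × Option Int :=
  match dfsVisitB edges destinations (pvFuel edges origin) origin [origin] 0
      PySem.Set.empty with
  | some (some (p, c), _) => (some p, some c)
  | some (none, _) => (none, none)
  | none => (none, none)

-- ===== PRECONDITION & SPEC =====
def Spec_dfs (edges : List (String × List (String × Int))) (origin : String) (destinations : List String) (out : Option (List String) × Option Int) : Prop := out = dfs_alt edges origin destinations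
instance (edges : List (String × List (String × Int))) (origin : String) (destinations : List String) (out : Option (List String) × Option Int) : Decidable (Spec_dfs edges origin destinations out) := by unfold Spec_dfs; infer_instance

-- ===== CLAIM (what is proved, stated in full; the proofs are below) =====
def Claim_equal_dfs : Prop := ∀ (edges : List (String × List (String × Int))) (origin : String) (destinations : List String), Dom_dfs edges origin destinations → Spec_dfs edges origin destinations (dfs edges origin destinations)

-- ===== LEMMAS AND PROOFS =====

-- no destination is ever in the visited set (invariant of both searches)
def pvInv (dests : List String) (v : PySem.Set String) : Prop :=
  ∀ x ∈ v, dests.contains x = false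

-- simulation statement: if A's loop, started with one fresh node on top of `rest`,
-- returns r, then B's visit of that node succeeds with the same fuel and accounts
-- for exactly the part of the search A does before reaching `rest`
def pvBR (edges : List (String × List (String × Int))) (dests : List String)
    (fa : Nat) : Prop :=
  ∀ (node : String) (path : List String) (cost : Int)
    (rest : List (String × List String × Int)) (v : PySem.Set String)
    (r : Option (List String) × Option Int),
    node ∉ v → pvInv dests v →
    dfsLoopA edges dests fa ((node, path, cost) :: rest) v = some r →
    ∃ out v', dfsVisitB edges dests fa node path cost v = some (out, v') ∧
      v ⊆ v' ∧ pvInv dests v' ∧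
      (∀ pp cc, out = some (pp, cc) → r = (some pp, some cc)) ∧
      (out = none → ∃ fa' ≤ fa, dfsLoopA edges dests fa' rest v' = some r)

-- small helpers about Bool-valued ifs and set membership
theorem pv_if_true {α : Type} {c : Bool} (h : c = true) (a b : α) :
    (if c = true then a else b) = a := if_pos h

theorem pv_if_false {α : Type} {c : Bool} (h : c = false) (a b : α) :
    (if c = true then a else b) = b := if_neg (by simp [h])

theorem pv_cont_true {v : PySem.Set String} {x : String} (h : x ∈ v) :
    PySem.Set.contains v x = true := (PySem.Set.contains_iff v x).mpr h

theorem pv_cont_false {v : PySem.Set String} {x : String} (h : x ∉ v) :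
    PySem.Set.contains v x = false := by
  cases hc : PySem.Set.contains v x
  · rfl
  · exact absurd ((PySem.Set.contains_iff v x).mp hc) h

theorem pv_mem_of_cont {v : PySem.Set String} {x : String}
    (h : PySem.Set.contains v x = true) : x ∈ v := (PySem.Set.contains_iff v x).mp h

theorem pv_not_mem_of_cont {v : PySem.Set String} {x : String}
    (h : PySem.Set.contains v x = false) : x ∉ v := fun hm => by
  rw [pv_cont_true hm] at h; cases h

-- unfolding (step) lemmas for the three recursive port functions
theorem dfsLoopA_zero (edges : List (String × List (String × Int))) (dests : List String)
    (stack : List (String × List String × Int)) (v : PySem.Set String) :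
    dfsLoopA edges dests 0 stack v = none := rfl

theorem dfsLoopA_nil (edges : List (String × List (String × Int))) (dests : List String)
    (f : Nat) (v : PySem.Set String) :
    dfsLoopA edges dests (f + 1) [] v = some (none, none) := rfl

theorem dfsLoopA_dest {edges : List (String × List (String × Int))} {dests : List String}
    {f : Nat} {node : String} {path : List String} {cost : Int}
    {rest : List (String × List String × Int)} {v : PySem.Set String}
    (hd : dests.contains node = true) :
    dfsLoopA edges dests (f + 1) ((node, path, cost) :: rest) v
      = some (some path, some cost) := by
  simp only [dfsLoopA]; rw [pv_if_true hd]

theorem dfsLoopA_skip {edges : List (String × List (String × Int))} {dests : List String}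
    {f : Nat} {node : String} {path : List String} {cost : Int}
    {rest : List (String × List String × Int)} {v : PySem.Set String}
    (hd : dests.contains node = false) (hc : PySem.Set.contains v node = true) :
    dfsLoopA edges dests (f + 1) ((node, path, cost) :: rest) v
      = dfsLoopA edges dests f rest v := by
  simp only [dfsLoopA]; rw [pv_if_false hd, pv_if_true hc]

theorem dfsLoopA_push {edges : List (String × List (String × Int))} {dests : List String}
    {f : Nat} {node : String} {path : List String} {cost : Int}
    {rest : List (String × List String × Int)} {v : PySem.Set String}
    (hd : dests.contains node = false) (hc : PySem.Set.contains v node = false) :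
    dfsLoopA edges dests (f + 1) ((node, path, cost) :: rest) v
      = dfsLoopA edges dests f
          ((pvAdj edges node).foldl
            (fun st q => if PySem.Set.contains (PySem.Set.add v node) q.1 then st
              else (q.1, path ++ [q.1], cost + q.2) :: st) rest)
          (PySem.Set.add v node) := by
  simp only [dfsLoopA]; rw [pv_if_false hd, pv_if_false hc]

theorem dfsVisitB_zero (edges : List (String × List (String × Int))) (dests : List String)
    (node : String) (path : List String) (cost : Int) (v : PySem.Set String) :
    dfsVisitB edges dests 0 node path cost v = none := by
  simp only [dfsVisitB]

theorem dfsVisitB_dest {edges : List (String × List (String × Int))} {dests : List String}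
    {f : Nat} {node : String} {path : List String} {cost : Int} {v : PySem.Set String}
    (hd : dests.contains node = true) :
    dfsVisitB edges dests (f + 1) node path cost v = some (some (path, cost), v) := by
  simp only [dfsVisitB]; rw [pv_if_true hd]

theorem dfsVisitB_go {edges : List (String × List (String × Int))} {dests : List String}
    {f : Nat} {node : String} {path : List String} {cost : Int} {v : PySem.Set String}
    (hd : dests.contains node = false) :
    dfsVisitB edges dests (f + 1) node path cost v
      = dfsIterB edges dests f ((pvAdj edges node).reverse) path cost
          (PySem.Set.add v node) := by
  simp only [dfsVisitB]; rw [pv_if_false hd]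

theorem dfsIterB_nil (edges : List (String × List (String × Int))) (dests : List String)
    (f : Nat) (path : List String) (cost : Int) (v : PySem.Set String) :
    dfsIterB edges dests f [] path cost v = some (none, v) := by
  simp only [dfsIterB]

theorem dfsIterB_skip {edges : List (String × List (String × Int))} {dests : List String}
    {f : Nat} {n : String} {c : Int} {ns : List (String × Int)}
    {path : List String} {cost : Int} {v : PySem.Set String}
    (hc : PySem.Set.contains v n = true) :
    dfsIterB edges dests f ((n, c) :: ns) path cost v
      = dfsIterB edges dests f ns path cost v := by
  simp only [dfsIterB]; rw [pv_if_true hc]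

theorem dfsIterB_step_none {edges : List (String × List (String × Int))} {dests : List String}
    {f : Nat} {n : String} {c : Int} {ns : List (String × Int)}
    {path : List String} {cost : Int} {v : PySem.Set String}
    (hc : PySem.Set.contains v n = false)
    (hm : dfsVisitB edges dests f n (path ++ [n]) (cost + c) v = none) :
    dfsIterB edges dests f ((n, c) :: ns) path cost v = none := by
  simp only [dfsIterB]; rw [pv_if_false hc, hm]

theorem dfsIterB_step_found {edges : List (String × List (String × Int))} {dests : List String}
    {f : Nat} {n : String} {c : Int} {ns : List (String × Int)}
    {path : List String} {cost : Int} {v v' : PySem.Set String}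
    {r : List String × Int}
    (hc : PySem.Set.contains v n = false)
    (hm : dfsVisitB edges dests f n (path ++ [n]) (cost + c) v = some (some r, v')) :
    dfsIterB edges dests f ((n, c) :: ns) path cost v = some (some r, v') := by
  simp only [dfsIterB]; rw [pv_if_false hc, hm]

theorem dfsIterB_step_dead {edges : List (String × List (String × Int))} {dests : List String}
    {f : Nat} {n : String} {c : Int} {ns : List (String × Int)}
    {path : List String} {cost : Int} {v v' : PySem.Set String}
    (hc : PySem.Set.contains v n = false)
    (hm : dfsVisitB edges dests f n (path ++ [n]) (cost + c) v = some (none, v')) :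
    dfsIterB edges dests f ((n, c) :: ns) path cost v
      = dfsIterB edges dests f ns path cost v' := by
  simp only [dfsIterB]; rw [pv_if_false hc, hm]

-- the push loop of A, written as a filtered, reversed, mapped prefix
theorem pv_fold_push (adj : List (String × Int)) (rest : List (String × List String × Int))
    (v' : PySem.Set String) (p : List String) (cost : Int) :
    adj.foldl (fun st q => if PySem.Set.contains v' q.1 then st
        else (q.1, p ++ [q.1], cost + q.2) :: st) rest
    = ((adj.reverse.filter (fun q => !PySem.Set.contains v' q.1)).map
        (fun q => (q.1, p ++ [q.1], cost + q.2))) ++ rest := by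
  induction adj generalizing rest with
  | nil => simp
  | cons a l ih =>
    simp only [List.foldl_cons, List.reverse_cons, List.filter_append, List.map_append,
      List.append_assoc]
    rw [ih]
    cases h : PySem.Set.contains v' a.1 with
    | true => simp [pv_mem_of_cont h]
    | false => simp [pv_not_mem_of_cont h]

-- fuel monotonicity of B's port
theorem pv_monoB (edges : List (String × List (String × Int))) (dests : List String) :
    ∀ f : Nat,
      (∀ n p c v x, dfsVisitB edges dests f n p c v = some x →
        dfsVisitB edges dests (f + 1) n p c v = some x) ∧
      (∀ ns p c v x, dfsIterB edges dests f ns p c v = some x →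
        dfsIterB edges dests (f + 1) ns p c v = some x) := by
  intro f
  induction f with
  | zero =>
    constructor
    · intro n p c v x h
      rw [dfsVisitB_zero] at h; cases h
    · intro ns p c v x h
      induction ns generalizing v with
      | nil => rw [dfsIterB_nil] at h ⊢; exact h
      | cons q ns ih =>
        obtain ⟨n, cc⟩ := q
        cases hc : PySem.Set.contains v n with
        | true =>
          rw [dfsIterB_skip hc] at h ⊢
          exact ih v h
        | false =>
          rw [dfsIterB_step_none hc (dfsVisitB_zero _ _ _ _ _ _)] at h
          cases h
  | succ g ih =>
    have hv : ∀ n p c v x, dfsVisitB edges dests (g + 1) n p c v = some x →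
        dfsVisitB edges dests (g + 2) n p c v = some x := by
      intro n p c v x h
      cases hd : dests.contains n with
      | true => rw [dfsVisitB_dest hd] at h ⊢; exact h
      | false =>
        rw [dfsVisitB_go hd] at h ⊢
        exact ih.2 _ _ _ _ _ h
    refine ⟨hv, ?_⟩
    intro ns p c v x h
    induction ns generalizing v with
    | nil => rw [dfsIterB_nil] at h ⊢; exact h
    | cons q ns ih2 =>
      obtain ⟨n, cc⟩ := q
      cases hc : PySem.Set.contains v n with
      | true =>
        rw [dfsIterB_skip hc] at h ⊢
        exact ih2 v h
      | false =>
        cases hm : dfsVisitB edges dests (g + 1) n (p ++ [n]) (c + cc) v with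
        | none => rw [dfsIterB_step_none hc hm] at h; cases h
        | some w =>
          obtain ⟨ow, vw⟩ := w
          cases ow with
          | none =>
            rw [dfsIterB_step_dead hc hm] at h
            rw [dfsIterB_step_dead hc (hv _ _ _ _ _ hm)]
            exact ih2 vw h
          | some rr =>
            rw [dfsIterB_step_found hc hm] at h
            rw [dfsIterB_step_found hc (hv _ _ _ _ _ hm)]
            exact h

theorem pv_monoB_iter_le (edges : List (String × List (String × Int))) (dests : List String)
    {f f' : Nat} (hle : f ≤ f') {ns : List (String × Int)} {p : List String} {c : Int}
    {v : PySem.Set String} {w : Option (List String × Int) × PySem.Set String}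
    (h : dfsIterB edges dests f ns p c v = some w) :
    dfsIterB edges dests f' ns p c v = some w := by
  induction f', hle using Nat.le_induction with
  | base => exact h
  | succ g hg ih => exact (pv_monoB edges dests g).2 _ _ _ _ _ ih

-- the inner simulation: A's loop on a pushed prefix vs B's neighbour iteration
theorem pv_iter_sim (edges : List (String × List (String × Int))) (dests : List String)
    (fa0 : Nat) (BRh : ∀ fa, fa ≤ fa0 → pvBR edges dests fa) :
    ∀ (ms : List (String × Int)) (fa : Nat), fa ≤ fa0 →
    ∀ (p : List String) (cost : Int) (rest : List (String × List String × Int))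
      (v0 v : PySem.Set String) (r : Option (List String) × Option Int),
      v0 ⊆ v → pvInv dests v →
      dfsLoopA edges dests fa
        (((ms.filter (fun q => !PySem.Set.contains v0 q.1)).map
          (fun q => (q.1, p ++ [q.1], cost + q.2))) ++ rest) v = some r →
      ∃ out v', dfsIterB edges dests fa ms p cost v = some (out, v') ∧
        v ⊆ v' ∧ pvInv dests v' ∧
        (∀ pp cc, out = some (pp, cc) → r = (some pp, some cc)) ∧
        (out = none → ∃ fa' ≤ fa, dfsLoopA edges dests fa' rest v' = some r) := by
  intro ms
  induction ms with
  | nil =>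
    intro fa hfa p cost rest v0 v r hsub hinv hl
    simp only [List.filter_nil, List.map_nil, List.nil_append] at hl
    refine ⟨none, v, dfsIterB_nil _ _ _ _ _ _, List.Subset.refl _, hinv, ?_, ?_⟩
    · intro pp cc h; cases h
    · intro _; exact ⟨fa, le_refl _, hl⟩
  | cons q ms ih =>
    obtain ⟨x, c⟩ := q
    intro fa hfa p cost rest v0 v r hsub hinv hl
    rw [List.filter_cons] at hl
    cases hv0 : PySem.Set.contains v0 x with
    | true =>
      -- already visited at push time: A never pushed it, B skips it
      rw [hv0] at hl
      simp only [Bool.not_true, Bool.false_eq_true, if_false] at hl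
      have hxv : PySem.Set.contains v x = true :=
        pv_cont_true (hsub (pv_mem_of_cont hv0))
      obtain ⟨out, v', h1, h2, h3, h4, h5⟩ :=
        ih fa hfa p cost rest v0 v r hsub hinv hl
      exact ⟨out, v', by rw [dfsIterB_skip hxv]; exact h1, h2, h3, h4, h5⟩
    | false =>
      rw [hv0] at hl
      simp only [Bool.not_false, if_true, List.map_cons, List.cons_append] at hl
      cases hxv : PySem.Set.contains v x with
      | true =>
        -- visited meanwhile: A pops and skips (not a destination by the invariant)
        cases fa with
        | zero => rw [dfsLoopA_zero] at hl; cases hl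
        | succ g =>
          have hxd : dests.contains x = false := hinv x (pv_mem_of_cont hxv)
          rw [dfsLoopA_skip hxd hxv] at hl
          obtain ⟨out, v', h1, h2, h3, h4, h5⟩ :=
            ih g (le_trans (Nat.le_succ g) hfa) p cost rest v0 v r hsub hinv hl
          refine ⟨out, v', ?_, h2, h3, h4, ?_⟩
          · rw [dfsIterB_skip hxv]
            exact pv_monoB_iter_le edges dests (Nat.le_succ g) h1
          · intro ho
            obtain ⟨fa', hfa', hl'⟩ := h5 ho
            exact ⟨fa', le_trans hfa' (Nat.le_succ g), hl'⟩
      | false =>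
        -- fresh node: hand it to the visit simulation
        have hxnv : x ∉ v := pv_not_mem_of_cont hxv
        obtain ⟨out1, v1, hb1, hb2, hb3, hb4, hb5⟩ :=
          BRh fa hfa x (p ++ [x]) (cost + c) _ v r hxnv hinv hl
        cases out1 with
        | some pc =>
          refine ⟨some pc, v1, ?_, hb2, hb3, ?_, ?_⟩
          · exact dfsIterB_step_found hxv hb1
          · intro pp cc h
            injection h with h
            subst h
            exact hb4 pp cc rfl
          · intro h; cases h
        | none =>
          obtain ⟨fa1, hfa1, hl1⟩ := hb5 rfl
          obtain ⟨out, v', h1, h2, h3, h4, h5⟩ :=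
            ih fa1 (le_trans hfa1 hfa) p cost rest v0 v1 r
              (fun y hy => hb2 (hsub hy)) hb3 hl1
          refine ⟨out, v', ?_, fun y hy => h2 (hb2 hy), h3, h4, ?_⟩
          · rw [dfsIterB_step_dead hxv hb1]
            exact pv_monoB_iter_le edges dests hfa1 h1
          · intro ho
            obtain ⟨fa', hfa', hl'⟩ := h5 ho
            exact ⟨fa', le_trans hfa' hfa1, hl'⟩

-- the outer simulation, by strong induction on A's fuel
theorem pv_br (edges : List (String × List (String × Int))) (dests : List String) :
    ∀ fa, pvBR edges dests fa := by
  intro fa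
  induction fa using Nat.strong_induction_on with
  | _ fa IH =>
    intro node path cost rest v r hnv hinv hl
    cases fa with
    | zero => rw [dfsLoopA_zero] at hl; cases hl
    | succ g =>
      cases hd : dests.contains node with
      | true =>
        rw [dfsLoopA_dest hd] at hl
        injection hl with hl
        refine ⟨some (path, cost), v, dfsVisitB_dest hd, List.Subset.refl _, hinv, ?_, ?_⟩
        · intro pp cc hout
          injection hout with hout
          cases hout
          exact hl.symm
        · intro h; cases h
      | false =>
        have hcv : PySem.Set.contains v node = false := pv_cont_false hnv
        rw [dfsLoopA_push hd hcv, pv_fold_push] at hl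
        have hinv' : pvInv dests (PySem.Set.add v node) := by
          intro y hy
          rcases (PySem.Set.mem_add v node y).mp hy with h | h
          · exact hinv y h
          · subst h; exact hd
        obtain ⟨out, v', h1, h2, h3, h4, h5⟩ :=
          pv_iter_sim edges dests g (fun fa' hfa' => IH fa' (Nat.lt_succ_of_le hfa'))
            ((pvAdj edges node).reverse) g (le_refl g) path cost rest
            (PySem.Set.add v node) (PySem.Set.add v node) r
            (List.Subset.refl _) hinv' hl
        refine ⟨out, v', ?_, ?_, h3, h4, ?_⟩
        · rw [dfsVisitB_go hd]; exact h1
        · intro y hy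
          exact h2 ((PySem.Set.mem_add v node y).mpr (Or.inl hy))
        · intro ho
          obtain ⟨fa', hfa', hl'⟩ := h5 ho
          exact ⟨fa', le_trans hfa' (Nat.le_succ g), hl'⟩

-- length of a dict lookup is bounded by the total adjacency size
theorem pv_getD_len (l : List (String × List (String × Int))) (k : String) :
    (PySem.Dict.getD (PySem.Dict.mk l) k []).length ≤ (l.map (fun p => p.2.length)).sum := by
  induction l with
  | nil => simp [PySem.Dict.getD, PySem.Dict.get?]
  | cons p l ih =>
    obtain ⟨k0, adj⟩ := p
    rw [PySem.Dict.getD_eq_get?_getD, PySem.Dict.get?_mk_cons]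
    rw [PySem.Dict.getD_eq_get?_getD] at ih
    cases h : (k0 == k) with
    | true => simp
    | false =>
      simp only [List.map_cons, List.sum_cons]
      simp
      omega

-- every value looked up in the dict is one of its stored lists (or the default)
theorem pv_getD_cases (l : List (String × List (String × Int))) (k : String) :
    PySem.Dict.getD (PySem.Dict.mk l) k [] = [] ∨
      ∃ p ∈ l, PySem.Dict.getD (PySem.Dict.mk l) k [] = p.2 := by
  induction l with
  | nil => left; simp [PySem.Dict.getD, PySem.Dict.get?]
  | cons p l ih =>
    obtain ⟨k0, adj⟩ := p
    rw [PySem.Dict.getD_eq_get?_getD, PySem.Dict.get?_mk_cons]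
    cases h : (k0 == k) with
    | true =>
      right
      refine ⟨(k0, adj), List.mem_cons_self, ?_⟩
      simp
    | false =>
      have hred : (if (false : Bool) = true then some adj
          else PySem.Dict.get? (PySem.Dict.mk l) k) = PySem.Dict.get? (PySem.Dict.mk l) k := by
        simp
      rw [hred, ← PySem.Dict.getD_eq_get?_getD]
      rcases ih with h' | ⟨p', hp', h'⟩
      · left; exact h'
      · right; exact ⟨p', List.mem_cons_of_mem _ hp', h'⟩

theorem pv_mem_adj (edges : List (String × List (String × Int))) (origin k : String)
    {q : String × Int} (hq : q ∈ pvAdj edges k) : q.1 ∈ pvAllNodes edges origin := by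
  rcases pv_getD_cases edges k with h | ⟨p, hp, h⟩
  · rw [pvAdj] at hq; rw [h] at hq; cases hq
  · rw [pvAdj] at hq; rw [h] at hq
    apply (PySem.Set.mem_ofList _ _).mpr
    apply List.mem_cons_of_mem
    exact List.mem_flatMap.mpr ⟨p, hp, List.mem_cons_of_mem _ (List.mem_map_of_mem hq)⟩

theorem pv_origin_mem (edges : List (String × List (String × Int))) (origin : String) :
    origin ∈ pvAllNodes edges origin :=
  (PySem.Set.mem_ofList _ _).mpr (List.mem_cons_self)

-- visiting a fresh relevant node shrinks the unvisited count by exactly one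
theorem pv_U_add (edges : List (String × List (String × Int))) (origin : String)
    {v : PySem.Set String} {n : String}
    (hn : n ∈ pvAllNodes edges origin) (hnv : n ∉ v) :
    ((pvAllNodes edges origin).filter
        (fun x => !PySem.Set.contains (PySem.Set.add v n) x)).length + 1
      = ((pvAllNodes edges origin).filter (fun x => !PySem.Set.contains v x)).length := by
  set L := pvAllNodes edges origin with hL
  have hnodup : L.Nodup := PySem.Set.nodup_ofList _
  have hpt : ∀ x, (!PySem.Set.contains (PySem.Set.add v n) x)
      = ((x != n) && (!PySem.Set.contains v x)) := by
    intro x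
    by_cases hxn : x = n
    · subst hxn
      rw [pv_cont_true ((PySem.Set.mem_add v x x).mpr (Or.inr rfl))]
      simp
    · have hsame : PySem.Set.contains (PySem.Set.add v n) x = PySem.Set.contains v x := by
        by_cases hxv : x ∈ v
        · rw [pv_cont_true ((PySem.Set.mem_add v n x).mpr (Or.inl hxv)), pv_cont_true hxv]
        · rw [pv_cont_false (fun hm => by
              rcases (PySem.Set.mem_add v n x).mp hm with h | h
              · exact hxv h
              · exact hxn h),
            pv_cont_false hxv]
      rw [hsame]
      have hb : (x != n) = true := by simp [hxn]
      rw [hb]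
      simp
  have hff : L.filter (fun x => !PySem.Set.contains (PySem.Set.add v n) x)
      = (L.filter (fun x => !PySem.Set.contains v x)).filter (fun x => x != n) := by
    rw [List.filter_filter]
    exact List.filter_congr (fun x _ => hpt x)
  set M := L.filter (fun x => !PySem.Set.contains v x) with hM
  have hMnodup : M.Nodup := List.Nodup.filter _ hnodup
  have hnM : n ∈ M := by
    rw [hM, List.mem_filter]
    refine ⟨hn, ?_⟩
    rw [pv_cont_false hnv]
    rfl
  have herase : M.erase n = M.filter (fun x => x != n) :=
    List.Nodup.erase_eq_filter hMnodup n
  have hlen : (M.erase n).length = M.length - 1 := List.length_erase_of_mem hnM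
  have hpos : 1 ≤ M.length := List.length_pos_of_mem hnM
  rw [hff, ← herase, hlen]
  omega

-- A's loop always returns within the pvFuel budget
theorem pv_termA (edges : List (String × List (String × Int))) (origin : String)
    (dests : List String) :
    ∀ (fa : Nat) (stack : List (String × List String × Int)) (v : PySem.Set String),
    (∀ e ∈ stack, e.1 ∈ pvAllNodes edges origin) →
    1 + stack.length +
      ((pvAllNodes edges origin).filter (fun x => !PySem.Set.contains v x)).length *
        (1 + pvTotalAdj edges) ≤ fa →
    ∃ r, dfsLoopA edges dests fa stack v = some r := by
  intro fa
  induction fa using Nat.strong_induction_on with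
  | _ fa IH =>
    intro stack v hmem hbound
    cases fa with
    | zero => omega
    | succ g =>
      cases stack with
      | nil => exact ⟨(none, none), dfsLoopA_nil _ _ _ _⟩
      | cons e rest =>
        obtain ⟨node, path, cost⟩ := e
        cases hd : dests.contains node with
        | true => exact ⟨(some path, some cost), dfsLoopA_dest hd⟩
        | false =>
          cases hcv : PySem.Set.contains v node with
          | true =>
            obtain ⟨r, hr⟩ := IH g (Nat.lt_succ_self g) rest v
              (fun e he => hmem e (List.mem_cons_of_mem _ he))
              (by simp only [List.length_cons] at hbound; omega)
            exact ⟨r, by rw [dfsLoopA_skip hd hcv]; exact hr⟩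
          | false =>
            have hnode : node ∈ pvAllNodes edges origin :=
              hmem (node, path, cost) (List.mem_cons_self)
            have hnv : node ∉ v := pv_not_mem_of_cont hcv
            have hlen : ((pvAdj edges node).foldl
                (fun st q => if PySem.Set.contains (PySem.Set.add v node) q.1 then st
                  else (q.1, path ++ [q.1], cost + q.2) :: st) rest).length
                ≤ (pvAdj edges node).length + rest.length := by
              rw [pv_fold_push, List.length_append, List.length_map]
              have := List.length_filter_le
                (fun q => !PySem.Set.contains (PySem.Set.add v node) q.1)
                (pvAdj edges node).reverse
              rw [List.length_reverse] at this
              omega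
            have hadjle : (pvAdj edges node).length ≤ pvTotalAdj edges :=
              pv_getD_len edges node
            have hU := pv_U_add edges origin hnode hnv
            have hmem' : ∀ e ∈ (pvAdj edges node).foldl
                (fun st q => if PySem.Set.contains (PySem.Set.add v node) q.1 then st
                  else (q.1, path ++ [q.1], cost + q.2) :: st) rest,
                e.1 ∈ pvAllNodes edges origin := by
              intro e he
              rw [pv_fold_push] at he
              rcases List.mem_append.mp he with h | h
              · obtain ⟨q, hq, rfl⟩ := List.mem_map.mp h
                exact pv_mem_adj edges origin node
                  (List.mem_reverse.mp (List.mem_filter.mp hq).1)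
              · exact hmem e (List.mem_cons_of_mem _ h)
            have hbound' : 1 + ((pvAdj edges node).foldl
                (fun st q => if PySem.Set.contains (PySem.Set.add v node) q.1 then st
                  else (q.1, path ++ [q.1], cost + q.2) :: st) rest).length +
                ((pvAllNodes edges origin).filter
                  (fun x => !PySem.Set.contains (PySem.Set.add v node) x)).length *
                  (1 + pvTotalAdj edges) ≤ g := by
              have hmul : ((pvAllNodes edges origin).filter
                    (fun x => !PySem.Set.contains v x)).length * (1 + pvTotalAdj edges)
                  = ((pvAllNodes edges origin).filter
                    (fun x => !PySem.Set.contains (PySem.Set.add v node) x)).length *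
                    (1 + pvTotalAdj edges) + (1 + pvTotalAdj edges) := by
                rw [← hU, Nat.succ_mul]
              simp only [List.length_cons] at hbound
              omega
            obtain ⟨r, hr⟩ := IH g (Nat.lt_succ_self g) _ (PySem.Set.add v node)
              hmem' hbound'
            exact ⟨r, by rw [dfsLoopA_push hd hcv]; exact hr⟩

-- ===== VERDICT (by name: the statement is the Claim_ definition above) =====
theorem dfs_spec : Claim_equal_dfs := by
  intro edges origin dests _
  unfold Spec_dfs
  have hU0 : ((pvAllNodes edges origin).filter
      (fun x => !PySem.Set.contains PySem.Set.empty x)).length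
      = (pvAllNodes edges origin).length := by
    rw [List.filter_eq_self.mpr]
    intro x _
    rw [pv_cont_false (fun h => by cases h)]
    rfl
  obtain ⟨r, hA⟩ := pv_termA edges origin dests (pvFuel edges origin)
    [(origin, [origin], 0)] PySem.Set.empty
    (by
      intro e he
      rcases List.mem_cons.mp he with h | h
      · subst h; exact pv_origin_mem edges origin
      · cases h)
    (by
      rw [pvFuel, hU0]
      simp only [List.length_cons, List.length_nil]
      omega)
  obtain ⟨out, v', h1, h2, h3, h4, h5⟩ :=
    pv_br edges dests (pvFuel edges origin) origin [origin] 0 [] PySem.Set.empty r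
      (fun h => by cases h) (fun x hx => by cases hx) hA
  have hdfs : dfs edges origin dests = r := by
    unfold dfs; rw [hA]
  rw [hdfs]
  unfold dfs_alt
  rw [h1]
  cases out with
  | some pc =>
    obtain ⟨pp, cc⟩ := pc
    rw [h4 pp cc rfl]
  | none =>
    obtain ⟨fa', hfa', hl'⟩ := h5 rfl
    cases fa' with
    | zero => rw [dfsLoopA_zero] at hl'; cases hl'
    | succ g =>
      rw [dfsLoopA_nil] at hl'
      injection hl' with hl'
      rw [← hl']
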